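-- pv_equiv track=rewrite | github.com/Shadowlrsp/GrapheTP | main.py | format_times_table
-- ===== SOURCE A (Python) =====
-- def format_times_table(times_list):
--     """Convert list of times (HH:MM:SS) into a grid format {hour: [minutes]}"""
--     grid = {h: [] for h in range(6, 23)}
--     for time_str in times_list:
--         try:
--             h, m, s = map(int, time_str.split(':'))
--             if 6 <= h <= 22:
--                 grid[h].append(m)
--         except:
--             pass
--     # Sort and deduplicate minutes for each hour
--     for h in grid:
--         grid[h] = sorted(list(set(grid[h])))
--     return grid
-- ===== SOURCE B (Python) =====
-- def format_times_table(times_list):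
--     """Convert list of times (HH:MM:SS) into a grid format {hour: [minutes]}"""
--     pairs = []
--     for time_str in times_list:
--         try:
--             h, m, s = map(int, time_str.split(':'))
--             if 6 <= h <= 22:
--                 pairs.append((h, m))
--         except:
--             pass
--     pairs.sort()
--     result = {}
--     for h in range(6, 23):
--         mins = []
--         for h2, m in pairs:
--             if h2 == h and (not mins or mins[-1] != m):
--                 mins.append(m)
--         result[h] = mins
--     return result
-- ===== Notes on version B (the rewrite author's own statement) =====
-- stated objective: alternative
-- what changed: A buckets minutes into a per-hour dict and then runs sorted(set(...)) on each of the 17 buckets; B collects all valid (hour, minute) pairs in one flat list, sorts it once globally (tuple order), and derives each hour's sorted unique minutes by a single adjacency-dedup scan, with no per-bucket set or per-bucket sort.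
import Mathlib
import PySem

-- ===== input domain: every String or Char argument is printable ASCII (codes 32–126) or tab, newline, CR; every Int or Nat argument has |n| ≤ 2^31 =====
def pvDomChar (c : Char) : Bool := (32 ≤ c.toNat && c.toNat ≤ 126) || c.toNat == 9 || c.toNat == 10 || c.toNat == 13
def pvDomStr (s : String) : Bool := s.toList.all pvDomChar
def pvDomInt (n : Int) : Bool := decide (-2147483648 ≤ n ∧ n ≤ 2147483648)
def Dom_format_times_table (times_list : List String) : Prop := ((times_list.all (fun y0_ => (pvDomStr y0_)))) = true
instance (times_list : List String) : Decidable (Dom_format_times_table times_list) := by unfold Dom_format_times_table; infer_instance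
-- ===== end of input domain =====

-- B replaces A's per-hour dict buckets + per-bucket sorted(set(...)) by one globally
-- sorted flat (hour, minute) list scanned with adjacency dedup; alternative decomposition, same cost.

-- ===== PORT A =====
-- the try-block 'h, m, s = map(int, time_str.split(':'))': succeeds iff the split has
-- exactly 3 parts and each parses as a Python int (any failure is swallowed by 'except').
-- Both Pythons contain this identical try-block, so the helper is shared by both ports.
def pvParse? (t : String) : Option (Int × Int × Int) :=
  match PySem.Str.split? t ":" with
  | some [a, b, c] =>
    match PySem.Int.ofStr? a, PySem.Int.ofStr? b, PySem.Int.ofStr? c with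
    | some h, some m, some s => some (h, m, s)
    | _, _, _ => none
  | _ => none

def format_times_table (times_list : List String) : List (Int × List Int) :=
  -- grid = {h: [] for h in range(6, 23)}  (distinct keys, so the dict IS this assoc list)
  let grid : PySem.Dict Int (List Int) :=
    PySem.Dict.mk ((PySem.List.pyRange 6 23).map (fun h => (h, ([] : List Int))))
  let grid := times_list.foldl (fun g t =>
    match pvParse? t with
    | some (h, m, _s) =>
        if 6 ≤ h ∧ h ≤ 22 then g.modify h [] (fun l => l ++ [m]) else g
    | none => g) grid
  -- 'for h in grid: grid[h] = sorted(list(set(grid[h])))' rewrites each key's value in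
  -- place; keys are distinct and keep their positions, so it is a map over the items.
  grid.items.map (fun p => (p.1, PySem.List.sorted (PySem.Set.ofList p.2) (fun x => x)))

-- ===== PORT B =====
def format_times_table_alt (times_list : List String) : List (Int × List Int) :=
  let pairs := times_list.foldl (fun acc t =>
    match pvParse? t with
    | some (h, m, _s) => if 6 ≤ h ∧ h ≤ 22 then acc ++ [(h, m)] else acc
    | none => acc) ([] : List (Int × Int))
  -- pairs.sort(): Python sorts the tuples lexicographically
  let ps := PySem.List.sorted2 pairs (fun p => p.1) (fun p => p.2)
  -- 'not mins or mins[-1] != m' is exactly 'mins.getLast? ≠ some m'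
  (PySem.List.pyRange 6 23).map (fun h =>
    (h, ps.foldl (fun mins p =>
          if p.1 = h ∧ mins.getLast? ≠ some p.2 then mins ++ [p.2] else mins) []))

-- ===== PRECONDITION & SPEC =====
def Spec_format_times_table (times_list : List String) (out : List (Int × List Int)) : Prop := out = format_times_table_alt times_list
instance (times_list : List String) (out : List (Int × List Int)) : Decidable (Spec_format_times_table times_list out) := by unfold Spec_format_times_table; infer_instance

-- ===== CLAIM (what is proved, stated in full; the proofs are below) =====
def Claim_equal_format_times_table : Prop := ∀ (times_list : List String), Dom_format_times_table times_list → Spec_format_times_table times_list (format_times_table times_list)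

-- ===== LEMMAS AND PROOFS =====

-- the accepted (hour, minute) pair of one time string, if any
def pvValid? (t : String) : Option (Int × Int) :=
  match pvParse? t with
  | some (h, m, _s) => if 6 ≤ h ∧ h ≤ 22 then some (h, m) else none
  | none => none

def pvPairs (ts : List String) : List (Int × Int) := ts.filterMap pvValid?

def pvBucket (ts : List String) (h : Int) : List Int :=
  ((pvPairs ts).filter (fun p => decide (p.1 = h))).map (fun p => p.2)

-- B's first loop builds pvPairs
lemma foldB_pairs (ts : List String) (acc : List (Int × Int)) :
    ts.foldl (fun acc t =>
      match pvParse? t with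
      | some (h, m, _s) => if 6 ≤ h ∧ h ≤ 22 then acc ++ [(h, m)] else acc
      | none => acc) acc = acc ++ pvPairs ts := by
  induction ts generalizing acc with
  | nil => simp [pvPairs]
  | cons t ts ih =>
    rcases hp : pvParse? t with _ | ⟨h, m, s⟩
    · have hv : pvValid? t = none := by simp [pvValid?, hp]
      simp only [List.foldl_cons, hp, pvPairs, List.filterMap_cons, hv]
      exact ih acc
    · by_cases hr : 6 ≤ h ∧ h ≤ 22
      · have hv : pvValid? t = some (h, m) := by simp [pvValid?, hp, hr]
        simp only [List.foldl_cons, hp, hr, pvPairs, List.filterMap_cons, hv]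
        rw [ih]
        simp [pvPairs]
      · have hv : pvValid? t = none := by simp [pvValid?, hp, hr]
        simp only [List.foldl_cons, hp, hr, if_neg, not_false_iff, pvPairs,
          List.filterMap_cons, hv]
        exact ih acc

lemma getD_mk_map (R : List Int) (f : Int → List Int) {h0 : Int} (hmem : h0 ∈ R) :
    (PySem.Dict.mk (R.map (fun h => (h, f h)))).getD h0 [] = f h0 := by
  induction R with
  | nil => simp at hmem
  | cons r R ih =>
    simp only [List.map_cons, PySem.Dict.getD, PySem.Dict.get?_mk_cons]
    by_cases hr : r = h0
    · simp [hr]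
    · rcases List.mem_cons.mp hmem with h | h
      · omega
      · have := ih h
        simp only [PySem.Dict.getD] at this
        simpa [beq_iff_eq, hr] using this

lemma insert_mk_map (R : List Int) (f : Int → List Int) {h0 : Int} (hmem : h0 ∈ R) (v : List Int) :
    (PySem.Dict.mk (R.map (fun h => (h, f h)))).insert h0 v
      = PySem.Dict.mk (R.map (fun h => (h, if h = h0 then v else f h))) := by
  have hc : (PySem.Dict.mk (R.map (fun h => (h, f h)))).contains h0 = true := by
    rw [PySem.Dict.contains_mk]
    simp only [List.any_map, List.any_eq_true]
    exact ⟨h0, hmem, by simp⟩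
  simp only [PySem.Dict.insert, hc, if_pos, List.map_map]
  congr 1
  apply List.map_congr_left
  intro h _
  by_cases hh : h = h0 <;> simp [hh]

-- A's dict-filling loop, characterised: starting from values f, it appends each hour's bucket
lemma foldA_items (ts : List String) (f : Int → List Int) :
    (ts.foldl (fun g t =>
      match pvParse? t with
      | some (h, m, _s) =>
          if 6 ≤ h ∧ h ≤ 22 then g.modify h [] (fun l => l ++ [m]) else g
      | none => g)
      (PySem.Dict.mk ((PySem.List.pyRange 6 23).map (fun h => (h, f h))))).items
    = (PySem.List.pyRange 6 23).map (fun h => (h, f h ++ pvBucket ts h)) := by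
  induction ts generalizing f with
  | nil => simp [pvBucket, pvPairs]
  | cons t ts ih =>
    simp only [List.foldl_cons]
    rcases hp : pvParse? t with _ | ⟨h0, m, s⟩
    · have hb : ∀ h, pvBucket (t :: ts) h = pvBucket ts h := by
        intro h; simp [pvBucket, pvPairs, pvValid?, hp]
      simp only [ih f, hb]
    · by_cases hr : 6 ≤ h0 ∧ h0 ≤ 22
      · have hmem : h0 ∈ PySem.List.pyRange 6 23 := by
          rw [PySem.List.mem_pyRange_one]; omega
        have hhead : (PySem.Dict.mk ((PySem.List.pyRange 6 23).map (fun h => (h, f h)))).modify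
            h0 [] (fun l => l ++ [m])
            = PySem.Dict.mk ((PySem.List.pyRange 6 23).map
                (fun h => (h, if h = h0 then f h0 ++ [m] else f h))) := by
          rw [PySem.Dict.modify, getD_mk_map _ f hmem, insert_mk_map _ f hmem]
        simp only []
        rw [if_pos hr, hhead, ih (fun h => if h = h0 then f h0 ++ [m] else f h)]
        apply List.map_congr_left
        intro h _
        have hb : pvBucket (t :: ts) h =
            (if h = h0 then [m] else []) ++ pvBucket ts h := by
          simp only [pvBucket, pvPairs, List.filterMap_cons, pvValid?, hp, hr]
          by_cases hh : h0 = h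
          · simp [hh]
          · have : h ≠ h0 := fun hc => hh hc.symm
            simp [hh, this]
        rw [hb]
        by_cases hh : h = h0 <;> simp [hh]
      · have hb : ∀ h, pvBucket (t :: ts) h = pvBucket ts h := by
          intro h; simp [pvBucket, pvPairs, pvValid?, hp, hr]
        simp only []
        rw [if_neg hr]
        simp only [ih f, hb]

-- sorted2 with keys fst, snd is sorted with the lexicographic key
lemma sorted2_eq_sorted_lex (xs : List (Int × Int)) :
    PySem.List.sorted2 xs (fun p => p.1) (fun p => p.2)
      = PySem.List.sorted xs (fun p => toLex (p.1, p.2)) := by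
  rw [PySem.List.sorted_eq_foldl_insertBy]
  simp only [PySem.List.sorted2]
  apply PySem.List.foldl_congr_mem
  intro acc x _
  congr 1
  simp only [Bool.false_eq_true, if_false]
  funext a b
  by_cases h1 : a.1 < b.1 <;> by_cases h2 : b.1 < a.1 <;> by_cases h3 : a.2 < b.2 <;>
    simp [h1, h2, h3, Prod.Lex.lt_iff] <;> omega

lemma last_le_of_pairwise_lt {l : List Int} (hp : l.Pairwise (· < ·)) {a x : Int}
    (hl : l.getLast? = some a) (hx : x ∈ l) : x ≤ a := by
  induction l with
  | nil => simp at hx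
  | cons y ys ih =>
    rcases ys with _ | ⟨z, zs⟩
    · simp at hl hx; omega
    · rw [List.getLast?_cons_cons] at hl
      rcases List.mem_cons.mp hx with rfl | hx
      · have ha : a ∈ z :: zs := List.mem_of_getLast? hl
        have := (List.pairwise_cons.mp hp).1 a ha
        omega
      · exact ih (List.pairwise_cons.mp hp).2 hl hx

-- adjacency dedup of a ≤-sorted list: strictly increasing, same elements
lemma dd_spec (ms : List Int) : ∀ (acc : List Int), ms.Pairwise (· ≤ ·) →
    acc.Pairwise (· < ·) → (∀ a ∈ acc, ∀ b ∈ ms, a ≤ b) →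
    (ms.foldl (fun mins m => if mins.getLast? ≠ some m then mins ++ [m] else mins) acc).Pairwise (· < ·)
    ∧ ∀ x, (x ∈ ms.foldl (fun mins m => if mins.getLast? ≠ some m then mins ++ [m] else mins) acc
            ↔ x ∈ acc ∨ x ∈ ms) := by
  induction ms with
  | nil => intro acc _ hacc _; simpa using hacc
  | cons m rest ih =>
    intro acc hms hacc hle
    have hms' := (List.pairwise_cons.mp hms).2
    have hmle : ∀ b ∈ rest, m ≤ b := (List.pairwise_cons.mp hms).1
    simp only [List.foldl_cons]
    by_cases hl : acc.getLast? ≠ some m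
    · rw [if_pos hl]
      have hacc' : (acc ++ [m]).Pairwise (· < ·) := by
        rw [List.pairwise_append]
        refine ⟨hacc, by simp, ?_⟩
        intro a ha b hb
        rcases List.mem_singleton.mp hb with rfl
        have ham : a ≤ b := hle a ha b (List.mem_cons_self ..)
        rcases hgl : acc.getLast? with _ | l
        · rw [List.getLast?_eq_none_iff] at hgl; subst hgl; simp at ha
        · have hal : a ≤ l := last_le_of_pairwise_lt hacc hgl ha
          have hlm : l ≤ b := hle l (List.mem_of_getLast? hgl) b (List.mem_cons_self ..)
          have : l ≠ b := fun hc => hl (by rw [hgl, hc])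
          omega
      have hle' : ∀ a ∈ acc ++ [m], ∀ b ∈ rest, a ≤ b := by
        intro a ha b hb
        rcases List.mem_append.mp ha with ha | ha
        · exact hle a ha b (List.mem_cons_of_mem _ hb)
        · rcases List.mem_singleton.mp ha with rfl; exact hmle b hb
      obtain ⟨h1, h2⟩ := ih (acc ++ [m]) hms' hacc' hle'
      refine ⟨h1, fun x => ?_⟩
      rw [h2 x]
      simp only [List.mem_append, List.mem_cons]
      tauto
    · rw [if_neg hl]
      rw [not_not] at hl
      have hmm : m ∈ acc := List.mem_of_getLast? hl
      have hle' : ∀ a ∈ acc, ∀ b ∈ rest, a ≤ b := fun a ha b hb =>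
        hle a ha b (List.mem_cons_of_mem _ hb)
      obtain ⟨h1, h2⟩ := ih acc hms' hacc hle'
      refine ⟨h1, fun x => ?_⟩
      rw [h2 x]
      constructor
      · tauto
      · rintro (hx | hx)
        · exact Or.inl hx
        · rcases List.mem_cons.mp hx with rfl | hx
          · exact Or.inl hmm
          · exact Or.inr hx

-- B's inner scan over the sorted pairs = sorted(set(bucket h))  (the per-hour value of A)
lemma value_eq (ts : List String) (h : Int) :
    PySem.List.sorted (PySem.Set.ofList (pvBucket ts h)) (fun x => x)
      = (PySem.List.sorted2 (pvPairs ts) (fun p => p.1) (fun p => p.2)).foldl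
          (fun mins p => if p.1 = h ∧ mins.getLast? ≠ some p.2 then mins ++ [p.2] else mins) [] := by
  set ps := PySem.List.sorted2 (pvPairs ts) (fun p => p.1) (fun p => p.2) with hps
  -- split the combined test into filter + dedup step
  have hsplit : ps.foldl
      (fun mins p => if p.1 = h ∧ mins.getLast? ≠ some p.2 then mins ++ [p.2] else mins) []
      = ((ps.filter (fun p => decide (p.1 = h))).map (fun p => p.2)).foldl
          (fun mins m => if mins.getLast? ≠ some m then mins ++ [m] else mins) [] := by
    rw [List.foldl_map, ← PySem.List.foldl_ite_eq_foldl_filter (fun p => p.1 = h)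
      (fun mins p => if mins.getLast? ≠ some p.2 then mins ++ [p.2] else mins) ps []]
    apply PySem.List.foldl_congr_mem
    intro acc x _
    by_cases h1 : x.1 = h <;> by_cases h2 : acc.getLast? ≠ some x.2 <;> simp [h1, h2]
  set ms := (ps.filter (fun p => decide (p.1 = h))).map (fun p => p.2) with hms
  -- ms is ≤-sorted
  have hlex := PySem.List.sorted_pairwise (pvPairs ts) (fun p => toLex (p.1, p.2))
  rw [← sorted2_eq_sorted_lex, ← hps] at hlex
  have hsorted : ms.Pairwise (· ≤ ·) := by
    rw [hms, List.pairwise_map]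
    refine List.Pairwise.imp_of_mem ?_ (hlex.filter _)
    intro a b ha hb hab
    have ha1 : a.1 = h := by simpa using (List.mem_filter.mp ha).2
    have hb1 : b.1 = h := by simpa using (List.mem_filter.mp hb).2
    rcases Prod.Lex.le_iff.mp hab with hlt | ⟨_, hle⟩
    · simp only [ofLex_toLex] at hlt
      simp only [ha1, hb1] at hlt
      omega
    · exact hle
  obtain ⟨hdd1, hdd2⟩ := dd_spec ms [] hsorted (by simp) (by simp)
  rw [hsplit]
  -- membership of ms: x ∈ ms ↔ (h, x) ∈ pvPairs ts ↔ x ∈ pvBucket ts h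
  have hmem : ∀ x, x ∈ ms ↔ x ∈ pvBucket ts h := by
    intro x
    have hperm := PySem.List.sorted2_perm (pvPairs ts) (fun p => p.1) (fun p => p.2) false
    rw [hms, List.mem_map, pvBucket, List.mem_map]
    constructor
    · rintro ⟨p, hp, rfl⟩
      refine ⟨p, ?_, rfl⟩
      rw [List.mem_filter] at hp ⊢
      exact ⟨hperm.mem_iff.mp hp.1, hp.2⟩
    · rintro ⟨p, hp, rfl⟩
      refine ⟨p, ?_, rfl⟩
      rw [List.mem_filter] at hp ⊢
      exact ⟨hperm.mem_iff.mpr hp.1, hp.2⟩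
  apply PySem.List.sorted_eq_of_perm_of_pairwise_lt
  · rw [List.perm_ext_iff_of_nodup (hdd1.imp ne_of_lt) (PySem.Set.nodup_ofList _)]
    intro x
    rw [hdd2 x, PySem.Set.mem_ofList]
    simp [hmem x]
  · exact hdd1

-- ===== VERDICT (by name: the statement is the Claim_ definition above) =====
theorem format_times_table_spec : Claim_equal_format_times_table := by
  intro times_list _
  unfold Spec_format_times_table format_times_table format_times_table_alt
  simp only [foldB_pairs times_list [], List.nil_append]
  rw [foldA_items times_list (fun _ => [])]
  simp only [List.map_map]
  apply List.map_congr_left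
  intro h _
  simp only [Function.comp_apply, List.nil_append, Prod.mk.injEq, true_and]
  exact value_eq times_list h
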